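-- pv_equiv track=rewrite | github.com/liaison/LeetCode | python/insert_digit_5.py | solution
-- ===== SOURCE A (Python) =====
-- from collections import deque
--
-- def solution(N):
--
--     positive = True if N >= 0 else False
--
--     if not positive:
--         N = - N
--
--     # split the integer number into a list of digits
--     nums = deque([])
--     remainder = N
--     while remainder > 0:
--         nums.appendleft(remainder % 10)
--         remainder = remainder // 10
--
--     new_nums = []
--     inserted = False
--     for digit in nums:
--         if positive:
--             if 5 >= digit and not inserted:
--                 new_nums.append(5)
--                 inserted = True
--             new_nums.append(digit)
--         else:
--             if 5 <= digit and not inserted: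
--                 new_nums.append(5)
--                 inserted = True
--             new_nums.append(digit)
--
--     if not inserted:
--         new_nums.append(5)
--
--     # aggregate a list of digits into an integer
--     power = 1
--     result = 0
--     for digit in reversed(new_nums):
--         result += power * digit
--         power = power * 10
--
--     if positive:
--         return result
--     else:
--         return -result
-- ===== SOURCE B (Python) =====
-- def solution(N):
--     # Try every insertion position of the digit 5 and take the best candidate.
--     # (Return value only; same sign handling and arithmetic digit extraction as the task.)
--     n = -N if N < 0 else N
--
--     # digits of n, most significant first (n == 0 -> empty list)
--     def digits(m):
--         if m <= 0:
--             return []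
--         return digits(m // 10) + [m % 10]
--
--     ds = digits(n)
--
--     def value(lst):
--         acc = 0
--         for d in lst:
--             acc = acc * 10 + d
--         return acc
--
--     candidates = [value(ds[:i] + [5] + ds[i:]) for i in range(len(ds) + 1)]
--
--     if N >= 0:
--         return max(candidates)
--     else:
--         return -min(candidates)
-- ===== Notes on version B (the rewrite author's own statement) =====
-- stated objective: alternative
-- what changed: B replaces A's one-pass greedy insertion (insert 5 before the first digit <=5 for positive / >=5 for negative) by generating every candidate number obtained by inserting a 5 at each position and taking max (positive) / -min of magnitudes (negative), keeping arithmetic digit extraction.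
-- intended difference: On inputs where some digit of |N| is strictly greater than 5 (for N>=0; strictly less for N<0) while every earlier digit is >=5 (resp. <=5) and one of them equals 5, A's non-strict tie comparison inserts the 5 too early and returns a non-optimal value (at the witness N=59 A returns 559), while B returns the true optimum (595 there), which is the intended 'maximize the number' answer. — e.g. on solution(59): A returns 559, B returns 595
import Mathlib
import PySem

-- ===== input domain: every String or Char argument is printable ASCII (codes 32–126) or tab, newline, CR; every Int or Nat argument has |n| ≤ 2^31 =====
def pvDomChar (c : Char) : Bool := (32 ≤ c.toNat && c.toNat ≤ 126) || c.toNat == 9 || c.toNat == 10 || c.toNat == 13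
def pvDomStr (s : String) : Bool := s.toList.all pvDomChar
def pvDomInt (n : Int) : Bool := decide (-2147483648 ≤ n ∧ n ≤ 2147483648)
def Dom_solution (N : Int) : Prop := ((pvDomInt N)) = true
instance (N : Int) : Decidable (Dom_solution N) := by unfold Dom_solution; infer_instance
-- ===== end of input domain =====

-- B tries every insertion position and takes the best candidate instead of A's one-pass greedy;
-- return-value equivalence outside D_solution (where A's `<=`-tie greedy is non-optimal).

-- ===== PORT A =====
-- while remainder > 0: nums.appendleft(remainder % 10); remainder = remainder // 10
def aDigitsLoop (remainder : Int) (nums : List Int) : List Int :=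
  if remainder > 0 then
    aDigitsLoop (PySem.Int.floordiv remainder 10) (PySem.Int.mod remainder 10 :: nums)
  else nums
termination_by remainder.toNat
decreasing_by
  rename_i h
  rw [PySem.Int.floordiv_eq_ediv_of_pos (by norm_num : (0:Int) < 10)]
  omega

-- for digit in nums: … (state: new_nums, inserted)
def aInsLoop (positive : Bool) (digits : List Int) (newNums : List Int) (inserted : Bool) :
    List Int × Bool :=
  match digits with
  | [] => (newNums, inserted)
  | digit :: rest =>
    if positive then
      if 5 ≥ digit ∧ inserted = false then aInsLoop positive rest (newNums ++ [5, digit]) true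
      else aInsLoop positive rest (newNums ++ [digit]) inserted
    else
      if 5 ≤ digit ∧ inserted = false then aInsLoop positive rest (newNums ++ [5, digit]) true
      else aInsLoop positive rest (newNums ++ [digit]) inserted

-- for digit in reversed(new_nums): result += power * digit; power *= 10
def aAggLoop (revNums : List Int) (power result : Int) : Int :=
  match revNums with
  | [] => result
  | digit :: rest => aAggLoop rest (power * 10) (result + power * digit)

def solution (N : Int) : Int :=
  let positive : Bool := decide (N ≥ 0)
  let N1 : Int := if positive = false then -N else N
  let nums := aDigitsLoop N1 []
  let res := aInsLoop positive nums [] false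
  let newNums := if res.2 = false then res.1 ++ [5] else res.1
  let result := aAggLoop newNums.reverse 1 0
  if positive then result else -result

-- ===== PORT B =====
-- digits of m, most significant first (m == 0 -> [])
def bDigits (m : Int) : List Int :=
  if m ≤ 0 then []
  else bDigits (PySem.Int.floordiv m 10) ++ [PySem.Int.mod m 10]
termination_by m.toNat
decreasing_by
  rename_i h
  rw [PySem.Int.floordiv_eq_ediv_of_pos (by norm_num : (0:Int) < 10)]
  omega

def bValue (lst : List Int) : Int := lst.foldl (fun acc d => acc * 10 + d) 0

def solution_alt (N : Int) : Int :=
  let n : Int := if N < 0 then -N else N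
  let ds := bDigits n
  let candidates := (PySem.List.pyRange 0 ((ds.length : Int) + 1) 1).map
    (fun i => bValue (PySem.List.slice ds none (some i) ++ [5] ++ PySem.List.slice ds (some i) none))
  if N ≥ 0 then
    -- candidates is nonempty, so Python's max never raises; max? is some here
    (PySem.List.max? candidates (fun x => x)).getD 0
  else
    -((PySem.List.min? candidates (fun x => x)).getD 0)

-- ===== PRECONDITION & SPEC =====
-- On these inputs A's tie comparison (non-strict instead of strict) inserts the new digit too
-- early and returns a non-optimal value, while B returns the intended optimum (at the witness
-- N = 59, A yields 559 and B yields 595): some digit of |N| lies strictly beyond 5 on the wrong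
-- side (for the sign of N), all digits before it lie on or at 5, and one of those is exactly 5.
def D_solution (N : Int) : Prop :=
  let ds := (Nat.digits 10 N.natAbs).reverse
  if 0 ≤ N then
    ∃ j < ds.length, 5 < ds.getD j 0 ∧ (∀ k < j, 5 ≤ ds.getD k 0) ∧ ∃ k < j, ds.getD k 0 = 5
  else
    ∃ j < ds.length, ds.getD j 0 < 5 ∧ (∀ k < j, ds.getD k 0 ≤ 5) ∧ ∃ k < j, ds.getD k 0 = 5
instance (N : Int) : Decidable (D_solution N) := by unfold D_solution; infer_instance

def Spec_solution (N : Int) (out : Int) : Prop := ¬ D_solution N → out = solution_alt N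
instance (N : Int) (out : Int) : Decidable (Spec_solution N out) := by unfold Spec_solution; infer_instance

def pvDiffWitness_solution : Int := 59
def pvDiffWitnessOut_solution : Int × Int := (559, 595)

-- ===== CLAIM (what is proved, stated in full; the proofs are below) =====
def Claim_unchanged_solution : Prop := ∀ (N : Int), Dom_solution N → Spec_solution N (solution N)
def Claim_changed_solution : Prop := Dom_solution (pvDiffWitness_solution) ∧ D_solution (pvDiffWitness_solution) ∧ solution (pvDiffWitness_solution) = pvDiffWitnessOut_solution.1 ∧ solution_alt (pvDiffWitness_solution) = pvDiffWitnessOut_solution.2 ∧ pvDiffWitnessOut_solution.1 ≠ pvDiffWitnessOut_solution.2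
def Claim_exact_solution : Prop := ∀ (N : Int), Dom_solution N → D_solution N → solution N ≠ solution_alt N

-- ===== LEMMAS AND PROOFS =====

-- value of a digit list, insertion of a 5, index of the first digit satisfying a predicate
def pvVal (L : List Int) : Int := L.foldl (fun acc d => acc * 10 + d) 0
def pvIns (i : Nat) (L : List Int) : List Int := L.take i ++ 5 :: L.drop i
def pvFirst (pred : Int → Bool) : List Int → Nat
  | [] => 0
  | d :: rest => if pred d then 0 else pvFirst pred rest + 1

theorem pvVal_acc (L : List Int) (a : Int) :
    L.foldl (fun acc d => acc * 10 + d) a = a * 10 ^ L.length + pvVal L := by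
  induction L generalizing a with
  | nil => simp [pvVal]
  | cons d rest ih =>
    simp only [List.foldl_cons, List.length_cons, pvVal]
    rw [ih (a * 10 + d), ih (0 * 10 + d)]
    ring

theorem pvVal_cons (d : Int) (L : List Int) : pvVal (d :: L) = d * 10 ^ L.length + pvVal L := by
  have := pvVal_acc L (0 * 10 + d)
  simpa [pvVal] using this

theorem pvVal_append (u v : List Int) :
    pvVal (u ++ v) = pvVal u * 10 ^ v.length + pvVal v := by
  simp only [pvVal, List.foldl_append]
  rw [pvVal_acc]
  rfl

theorem pvVal_bounds (L : List Int) (h : ∀ d ∈ L, 0 ≤ d ∧ d < 10) :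
    0 ≤ pvVal L ∧ pvVal L < 10 ^ L.length := by
  induction L with
  | nil => simp [pvVal]
  | cons d rest ih =>
    have hd := h d (by simp)
    have hrest := ih (fun x hx => h x (by simp [hx]))
    rw [pvVal_cons]
    have hp : (0:Int) < 10 ^ rest.length := by positivity
    constructor
    · nlinarith [hd.1, hrest.1]
    · have : d ≤ 9 := by omega
      simp only [List.length_cons, pow_succ]
      nlinarith [hrest.2]

-- lexicographic comparison of equal-length digit lists with a common prefix
theorem pvVal_lex (u t1 t2 : List Int) (x y : Int) (hlen : t1.length = t2.length)
    (h1 : ∀ d ∈ t1, 0 ≤ d ∧ d < 10) (h2 : ∀ d ∈ t2, 0 ≤ d ∧ d < 10) (hxy : x < y) :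
    pvVal (u ++ x :: t1) < pvVal (u ++ y :: t2) := by
  rw [pvVal_append, pvVal_append]
  simp only [List.length_cons, hlen]
  rw [pvVal_cons, pvVal_cons]
  have hb1 := pvVal_bounds t1 h1
  have hb2 := pvVal_bounds t2 h2
  have hp : (0:Int) < 10 ^ t2.length := by positivity
  have hx1 : (x + 1) * 10 ^ t2.length ≤ y * 10 ^ t2.length := by
    apply mul_le_mul_of_nonneg_right (by omega) (le_of_lt hp)
  rw [hlen] at hb1 ⊢
  nlinarith [hb1.2, hb2.1]

theorem pvIns_decomp (L : List Int) (i j : Nat) (hij : i < j) (hj : j ≤ L.length) :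
    ∃ t2, pvIns j L = L.take i ++ L.getD i 0 :: t2 ∧ t2.length = (L.drop i).length ∧
      (∀ d ∈ t2, d ∈ L ∨ d = 5) := by
  have hi : i < L.length := lt_of_lt_of_le hij hj
  refine ⟨(L.drop (i+1)).take (j-i-1) ++ 5 :: L.drop j, ?_, ?_, ?_⟩
  · show L.take j ++ 5 :: L.drop j = _
    have h1 : L.take j = L.take i ++ (L.drop i).take (j - i) := by
      rw [← List.take_add]
      congr 1
      omega
    have h2 : L.drop i = L.getD i 0 :: L.drop (i+1) := by
      rw [List.getD_eq_getElem L 0 hi]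
      exact List.drop_eq_getElem_cons hi
    have h3 : j - i = (j - i - 1) + 1 := by omega
    rw [h1, h2, h3]
    simp [List.take_succ_cons]
  · simp [List.length_take, List.length_drop]
    omega
  · intro d hd
    simp only [List.mem_append, List.mem_cons] at hd
    rcases hd with h | h | h
    · exact Or.inl (List.mem_of_mem_drop (List.mem_of_mem_take h))
    · exact Or.inr h
    · exact Or.inl (List.mem_of_mem_drop h)

theorem pvIns_lt_of_gt (L : List Int) (hb : ∀ d ∈ L, 0 ≤ d ∧ d < 10) (i j : Nat)
    (hij : i < j) (hj : j ≤ L.length) (h5 : 5 < L.getD i 0) :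
    pvVal (pvIns i L) < pvVal (pvIns j L) := by
  obtain ⟨t2, he, hl, hm⟩ := pvIns_decomp L i j hij hj
  rw [he]
  refine pvVal_lex (L.take i) (L.drop i) t2 5 (L.getD i 0) hl.symm
    (fun d hd => hb d (List.mem_of_mem_drop hd)) (fun d hd => ?_) h5
  rcases hm d hd with h | h
  · exact hb d h
  · subst h; norm_num

theorem pvIns_lt_of_lt (L : List Int) (hb : ∀ d ∈ L, 0 ≤ d ∧ d < 10) (i j : Nat)
    (hij : i < j) (hj : j ≤ L.length) (h5 : L.getD i 0 < 5) :
    pvVal (pvIns j L) < pvVal (pvIns i L) := by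
  obtain ⟨t2, he, hl, hm⟩ := pvIns_decomp L i j hij hj
  rw [he]
  refine pvVal_lex (L.take i) t2 (L.drop i) (L.getD i 0) 5 hl
    (fun d hd => ?_) (fun d hd => hb d (List.mem_of_mem_drop hd)) h5
  rcases hm d hd with h | h
  · exact hb d h
  · subst h; norm_num

theorem pvIns_eq_succ (L : List Int) (i : Nat) (hi : i < L.length) (h5 : L.getD i 0 = 5) :
    pvIns i L = pvIns (i + 1) L := by
  show L.take i ++ 5 :: L.drop i = L.take (i+1) ++ 5 :: L.drop (i+1)
  have h2 : L.drop i = L.getD i 0 :: L.drop (i+1) := by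
    rw [List.getD_eq_getElem L 0 hi]
    exact List.drop_eq_getElem_cons hi
  rw [h2, h5, List.take_add_one, List.getElem?_eq_getElem hi]
  rw [← List.getD_eq_getElem L 0 hi, h5]
  simp

theorem pvIns_eq_run (L : List Int) (i j : Nat) (hij : i ≤ j) (hj : j ≤ L.length)
    (h5 : ∀ k, i ≤ k → k < j → L.getD k 0 = 5) : pvIns i L = pvIns j L := by
  induction j, hij using Nat.le_induction with
  | base => rfl
  | succ j hij ih =>
    rw [ih (by omega) (fun k hk1 hk2 => h5 k hk1 (by omega))]
    exact pvIns_eq_succ L j (by omega) (h5 j hij (by omega))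

theorem pvFirst_le_length (p : Int → Bool) (L : List Int) : pvFirst p L ≤ L.length := by
  induction L with
  | nil => simp [pvFirst]
  | cons d rest ih =>
    simp only [pvFirst, List.length_cons]
    split <;> omega

theorem pvFirst_before (p : Int → Bool) (L : List Int) (k : Nat) (hk : k < pvFirst p L) :
    p (L.getD k 0) = false := by
  induction L generalizing k with
  | nil => simp [pvFirst] at hk
  | cons d rest ih =>
    by_cases hp : p d = true
    · simp [pvFirst, hp] at hk
    · simp only [pvFirst, hp, if_false, Bool.false_eq_true] at hk
      cases k with
      | zero => simpa using eq_false_of_ne_true hp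
      | succ k => exact ih k (by omega)

theorem pvFirst_at (p : Int → Bool) (L : List Int) (h : pvFirst p L < L.length) :
    p (L.getD (pvFirst p L) 0) = true := by
  induction L with
  | nil => simp [pvFirst] at h
  | cons d rest ih =>
    by_cases hp : p d = true
    · simp [pvFirst, hp]
    · simp only [pvFirst, hp, if_false, Bool.false_eq_true, List.length_cons] at h ⊢
      simpa using ih (by omega)

theorem pvFirst_eq (p : Int → Bool) (L : List Int) (i : Nat) (hi : i < L.length)
    (hbefore : ∀ k < i, p (L.getD k 0) = false) (hat : p (L.getD i 0) = true) :
    pvFirst p L = i := by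
  rcases lt_trichotomy (pvFirst p L) i with h | h | h
  · have := hbefore _ h
    rw [pvFirst_at p L (lt_trans h hi)] at this
    exact absurd this (by simp)
  · exact h
  · have := pvFirst_before p L i h
    rw [hat] at this
    exact absurd this (by simp)

-- the loops of port A
theorem aDigitsLoop_eq (r : Int) (acc : List Int) : aDigitsLoop r acc = bDigits r ++ acc := by
  fun_induction aDigitsLoop r acc with
  | case1 r acc h ih =>
    rw [ih]
    conv_rhs => rw [bDigits]
    rw [if_neg (by omega : ¬ r ≤ 0)]
    simp
  | case2 r acc h =>
    rw [bDigits]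
    simp [if_pos (by omega : r ≤ 0)]

theorem bDigits_bounds (m : Int) : ∀ d ∈ bDigits m, 0 ≤ d ∧ d < 10 := by
  fun_induction bDigits m with
  | case1 m h => simp
  | case2 m h ih =>
    intro d hd
    simp only [List.mem_append, List.mem_singleton] at hd
    rcases hd with hd | hd
    · exact ih d hd
    · subst hd
      rw [PySem.Int.mod_eq_emod_of_pos (by norm_num : (0:Int) < 10)]
      omega

theorem bDigits_eq_natDigits (m : Int) (hm : 0 ≤ m) :
    bDigits m = ((Nat.digits 10 m.toNat).reverse).map (fun d => Int.ofNat d) := by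
  fun_induction bDigits m with
  | case1 m h =>
    have : m.toNat = 0 := by omega
    simp [this]
  | case2 m h ih =>
    have hm0 : 0 < m := by omega
    have hrw : bDigits m = bDigits (PySem.Int.floordiv m 10) ++ [PySem.Int.mod m 10] := by
      conv_lhs => rw [bDigits]
      rw [if_neg h]
    have hfd : PySem.Int.floordiv m 10 = ((m.toNat / 10 : Nat) : Int) := by
      rw [PySem.Int.floordiv_eq_ediv_of_pos (by norm_num : (0:Int) < 10)]
      omega
    have hmd : PySem.Int.mod m 10 = ((m.toNat % 10 : Nat) : Int) := by
      rw [PySem.Int.mod_eq_emod_of_pos (by norm_num : (0:Int) < 10)]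
      omega
    have hdig : Nat.digits 10 m.toNat = m.toNat % 10 :: Nat.digits 10 (m.toNat / 10) :=
      Nat.digits_def' (by norm_num : 1 < 10) (by omega)
    rw [ih (by rw [hfd]; positivity), hdig, hfd, hmd]
    have : (((m.toNat / 10 : Nat) : Int)).toNat = m.toNat / 10 := by omega
    rw [this]
    simp

theorem aInsLoop_true (positive : Bool) (L acc : List Int) :
    aInsLoop positive L acc true = (acc ++ L, true) := by
  induction L generalizing acc with
  | nil => simp [aInsLoop]
  | cons d rest ih =>
    simp only [aInsLoop]
    cases positive <;> simp [ih]

theorem aInsLoop_false (positive : Bool) (L acc : List Int) :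
    aInsLoop positive L acc false =
      if pvFirst (fun d => if positive then decide (d ≤ 5) else decide (5 ≤ d)) L < L.length then
        (acc ++ pvIns (pvFirst (fun d => if positive then decide (d ≤ 5) else decide (5 ≤ d)) L) L, true)
      else (acc ++ L, false) := by
  induction L generalizing acc with
  | nil => simp [aInsLoop, pvFirst]
  | cons d rest ih =>
    set pr : Int → Bool := fun d => if positive then decide (d ≤ 5) else decide (5 ≤ d) with hpr
    by_cases hd : pr d = true
    · have h1 : pvFirst pr (d :: rest) = 0 := by simp [pvFirst, hd]
      have h2 : aInsLoop positive (d :: rest) acc false = aInsLoop positive rest (acc ++ [5, d]) true := by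
        cases positive <;> simp only [aInsLoop] <;> simp [hpr] at hd <;> simp [hd]
      rw [h2, aInsLoop_true, h1]
      simp [pvIns]
    · have h1 : pvFirst pr (d :: rest) = pvFirst pr rest + 1 := by simp [pvFirst, hd]
      have h2 : aInsLoop positive (d :: rest) acc false = aInsLoop positive rest (acc ++ [d]) false := by
        cases positive <;> simp only [aInsLoop] <;> simp [hpr] at hd <;> simp [hd]
      rw [h2, ih, h1]
      have h3 : pvIns (pvFirst pr rest + 1) (d :: rest) = d :: pvIns (pvFirst pr rest) rest := by
        simp [pvIns]
      simp only [List.length_cons, h3]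
      split_ifs with hc hc2 hc2 <;> try omega
      · simp
      · simp

theorem aAggLoop_eq (l : List Int) (p r : Int) : aAggLoop l p r = r + p * pvVal l.reverse := by
  induction l generalizing p r with
  | nil => simp [aAggLoop, pvVal]
  | cons d rest ih =>
    simp only [aAggLoop, List.reverse_cons]
    rw [ih, pvVal_append]
    have : pvVal [d] = d := by simp [pvVal]
    rw [this]
    simp
    ring

-- closed forms of the two ports
theorem solution_closed_pos (N : Int) (hN : 0 ≤ N) :
    solution N = pvVal (pvIns (pvFirst (fun d => decide (d ≤ 5)) (bDigits N)) (bDigits N)) := by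
  have hpos : (decide (N ≥ 0)) = true := by simpa using hN
  simp only [solution, hpos, aDigitsLoop_eq, List.append_nil, aInsLoop_false, if_true,
    Bool.true_eq_false, if_false, aAggLoop_eq, List.reverse_reverse, one_mul, zero_add]
  set L := bDigits N with hL
  by_cases hc : pvFirst (fun d => decide (d ≤ 5)) L < L.length
  · simp [hc]
  · have hlen : pvFirst (fun d => decide (d ≤ 5)) L = L.length :=
      le_antisymm (pvFirst_le_length _ _) (not_lt.mp hc)
    simp only [hc, if_false]
    simp [hlen, pvIns]

theorem solution_closed_neg (N : Int) (hN : N < 0) :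
    solution N = -pvVal (pvIns (pvFirst (fun d => decide (5 ≤ d)) (bDigits (-N))) (bDigits (-N))) := by
  have hpos : (decide (N ≥ 0)) = false := by simp; omega
  simp only [solution, hpos, aDigitsLoop_eq, List.append_nil, aInsLoop_false, aAggLoop_eq,
    List.reverse_reverse, one_mul, zero_add, Bool.false_eq_true, if_false, if_true]
  by_cases hc : pvFirst (fun d => decide (5 ≤ d)) (bDigits (-N)) < (bDigits (-N)).length
  · simp [hc]
  · have hlen : pvFirst (fun d => decide (5 ≤ d)) (bDigits (-N)) = (bDigits (-N)).length :=
      le_antisymm (pvFirst_le_length _ _) (not_lt.mp hc)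
    simp [hlen, pvIns]

theorem candidates_eq (L : List Int) :
    (PySem.List.pyRange 0 ((L.length : Int) + 1) 1).map
      (fun i => bValue (PySem.List.slice L none (some i) ++ [5] ++ PySem.List.slice L (some i) none))
    = (List.range (L.length + 1)).map (fun k => pvVal (pvIns k L)) := by
  have h1 : ((L.length : Int) + 1) = ((L.length + 1 : Nat) : Int) := by push_cast; ring
  rw [h1, PySem.List.pyRange_zero_natCast, List.map_map]
  apply List.map_congr_left
  intro k hk
  simp only [Function.comp_apply]
  rw [PySem.List.slice_to_natCast, PySem.List.slice_from_natCast]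
  simp [bValue, pvVal, pvIns, List.append_assoc]

-- D restated on the Int digit list
def pvDpos (L : List Int) : Prop :=
  ∃ i < L.length, ∃ j < L.length, i < j ∧ L.getD i 0 = 5 ∧
    (∀ k < i, 5 < L.getD k 0) ∧ (∀ k < j, i ≤ k → 5 ≤ L.getD k 0) ∧ 5 < L.getD j 0
def pvDneg (L : List Int) : Prop :=
  ∃ i < L.length, ∃ j < L.length, i < j ∧ L.getD i 0 = 5 ∧
    (∀ k < i, L.getD k 0 < 5) ∧ (∀ k < j, i ≤ k → L.getD k 0 ≤ 5) ∧ L.getD j 0 < 5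

theorem getD_map_cast (ds : List Nat) (k : Nat) :
    ((ds.map (fun d => Int.ofNat d)).getD k 0) = ((ds.getD k 0 : Nat) : Int) := by
  induction ds generalizing k with
  | nil => simp
  | cons d rest ih =>
    cases k with
    | zero => simp
    | succ k => simpa using ih k

theorem pvFirst_le_of_true (p : Int → Bool) (L : List Int) (k : Nat)
    (hk : p (L.getD k 0) = true) : pvFirst p L ≤ k := by
  by_contra hc
  rw [pvFirst_before p L k (by omega)] at hk
  exact Bool.false_ne_true hk

def pvShortPos (L : List Int) : Prop :=
  ∃ j < L.length, 5 < L.getD j 0 ∧ (∀ k < j, 5 ≤ L.getD k 0) ∧ ∃ k < j, L.getD k 0 = 5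
def pvShortNeg (L : List Int) : Prop :=
  ∃ j < L.length, L.getD j 0 < 5 ∧ (∀ k < j, L.getD k 0 ≤ 5) ∧ ∃ k < j, L.getD k 0 = 5

theorem short_iff_pos (L : List Int) : pvShortPos L ↔ pvDpos L := by
  constructor
  · rintro ⟨j, hj, h5j, hall, k0, hk0, h5k0⟩
    set i := pvFirst (fun d => decide (d ≤ 5)) L with hi
    have hik0 : i ≤ k0 := pvFirst_le_of_true _ L k0 (by simp only [decide_eq_true_eq]; omega)
    have hilen : i < L.length := by omega
    have h5i : L.getD i 0 = 5 := by
      have h1 := pvFirst_at _ L hilen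
      rw [← hi] at h1
      simp only [decide_eq_true_eq] at h1
      have h2 := hall i (by omega)
      omega
    refine ⟨i, by omega, j, hj, by omega, h5i, ?_, fun k hk _ => hall k hk, h5j⟩
    intro k hk
    have := pvFirst_before _ L k hk
    simp only [decide_eq_false_iff_not, not_le] at this
    omega
  · rintro ⟨i, hi, j, hj, hij, h5i, hbef, hmid, h5j⟩
    refine ⟨j, hj, h5j, ?_, ⟨i, hij, h5i⟩⟩
    intro k hk
    rcases Nat.lt_or_ge k i with h | h
    · have := hbef k h
      omega
    · exact hmid k hk h

theorem short_iff_neg (L : List Int) : pvShortNeg L ↔ pvDneg L := by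
  constructor
  · rintro ⟨j, hj, h5j, hall, k0, hk0, h5k0⟩
    set i := pvFirst (fun d => decide (5 ≤ d)) L with hi
    have hik0 : i ≤ k0 := pvFirst_le_of_true _ L k0 (by simp only [decide_eq_true_eq]; omega)
    have hilen : i < L.length := by omega
    have h5i : L.getD i 0 = 5 := by
      have h1 := pvFirst_at _ L hilen
      rw [← hi] at h1
      simp only [decide_eq_true_eq] at h1
      have h2 := hall i (by omega)
      omega
    refine ⟨i, by omega, j, hj, by omega, h5i, ?_, fun k hk _ => hall k hk, h5j⟩
    intro k hk
    have := pvFirst_before _ L k hk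
    simp only [decide_eq_false_iff_not, not_le] at this
    omega
  · rintro ⟨i, hi, j, hj, hij, h5i, hbef, hmid, h5j⟩
    refine ⟨j, hj, h5j, ?_, ⟨i, hij, h5i⟩⟩
    intro k hk
    rcases Nat.lt_or_ge k i with h | h
    · have := hbef k h
      omega
    · exact hmid k hk h

theorem D_iff_pos (N : Int) (hN : 0 ≤ N) : D_solution N ↔ pvDpos (bDigits N) := by
  rw [← short_iff_pos]
  have hna : N.natAbs = N.toNat := by omega
  unfold D_solution pvShortPos
  rw [bDigits_eq_natDigits N hN, if_pos hN, hna]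
  simp only [List.length_map, getD_map_cast, List.length_reverse]
  constructor
  · rintro ⟨j, hj, h1, h2, k, hk, h3⟩
    exact ⟨j, hj, by exact_mod_cast h1, fun m hm => by exact_mod_cast h2 m hm, k, hk, by exact_mod_cast h3⟩
  · rintro ⟨j, hj, h1, h2, k, hk, h3⟩
    exact ⟨j, hj, by exact_mod_cast h1, fun m hm => by exact_mod_cast h2 m hm, k, hk, by exact_mod_cast h3⟩

theorem D_iff_neg (N : Int) (hN : N < 0) : D_solution N ↔ pvDneg (bDigits (-N)) := by
  rw [← short_iff_neg]
  have hna : N.natAbs = (-N).toNat := by omega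
  unfold D_solution pvShortNeg
  rw [bDigits_eq_natDigits (-N) (by omega), if_neg (by omega : ¬ 0 ≤ N), hna]
  simp only [List.length_map, getD_map_cast, List.length_reverse]
  constructor
  · rintro ⟨j, hj, h1, h2, k, hk, h3⟩
    exact ⟨j, hj, by exact_mod_cast h1, fun m hm => by exact_mod_cast h2 m hm, k, hk, by exact_mod_cast h3⟩
  · rintro ⟨j, hj, h1, h2, k, hk, h3⟩
    exact ⟨j, hj, by exact_mod_cast h1, fun m hm => by exact_mod_cast h2 m hm, k, hk, by exact_mod_cast h3⟩

-- A's greedy insertion position is optimal outside D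
theorem greedy_max (L : List Int) (hb : ∀ d ∈ L, 0 ≤ d ∧ d < 10) (hnD : ¬ pvDpos L)
    (i : Nat) (hi : i ≤ L.length) :
    pvVal (pvIns i L) ≤ pvVal (pvIns (pvFirst (fun d => decide (d ≤ 5)) L) L) := by
  set pr : Int → Bool := fun d => decide (d ≤ 5) with hpr
  set p := pvFirst pr L with hp
  have hple : p ≤ L.length := pvFirst_le_length pr L
  rcases Nat.lt_trichotomy i p with hlt | heq | hgt
  · have h5 : 5 < L.getD i 0 := by
      have := pvFirst_before pr L i hlt
      simp only [hpr, decide_eq_false_iff_not, not_le] at this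
      omega
    exact le_of_lt (pvIns_lt_of_gt L hb i p hlt hple h5)
  · rw [heq]
  · have hplen : p < L.length := lt_of_lt_of_le hgt hi
    have h5p : L.getD p 0 ≤ 5 := by
      have := pvFirst_at pr L hplen
      simp only [hpr, decide_eq_true_eq] at this
      exact this
    by_cases h5 : L.getD p 0 = 5
    · by_cases hall : ∀ k, p ≤ k → k < i → L.getD k 0 = 5
      · rw [pvIns_eq_run L p i (le_of_lt hgt) hi hall]
      · push Not at hall
        have hex : ∃ k, p ≤ k ∧ k < i ∧ L.getD k 0 ≠ 5 := by
          obtain ⟨k, h1, h2, h3⟩ := hall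
          exact ⟨k, h1, h2, h3⟩
        obtain ⟨hk1, hk2, hk3⟩ := Nat.find_spec hex
        set k0 := Nat.find hex with hk0
        have hmin : ∀ m, p ≤ m → m < k0 → L.getD m 0 = 5 := by
          intro m hm1 hm2
          by_contra hc
          exact absurd ⟨hm1, by omega, hc⟩ (Nat.find_min hex hm2)
        have hpk0 : p < k0 := by
          rcases Nat.eq_or_lt_of_le hk1 with he | hlt'
          · exact absurd h5 (he ▸ hk3)
          · exact hlt'
        have hk0lt : L.getD k0 0 < 5 := by
          by_contra hc
          push Not at hc
          have h5lt : 5 < L.getD k0 0 := by omega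
          apply hnD
          refine ⟨p, by omega, k0, by omega, hpk0, h5, ?_, ?_, h5lt⟩
          · intro k hk
            have := pvFirst_before pr L k hk
            simp only [hpr, decide_eq_false_iff_not, not_le] at this
            omega
          · intro k hk1' hk2'
            have := hmin k hk2' hk1'
            omega
        have hrun : pvIns p L = pvIns k0 L := pvIns_eq_run L p k0 (le_of_lt hpk0) (by omega) hmin
        rw [hrun]
        exact le_of_lt (pvIns_lt_of_lt L hb k0 i hk2 hi hk0lt)
    · have h5lt : L.getD p 0 < 5 := by omega
      exact le_of_lt (pvIns_lt_of_lt L hb p i hgt hi h5lt)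

theorem greedy_min (L : List Int) (hb : ∀ d ∈ L, 0 ≤ d ∧ d < 10) (hnD : ¬ pvDneg L)
    (i : Nat) (hi : i ≤ L.length) :
    pvVal (pvIns (pvFirst (fun d => decide (5 ≤ d)) L) L) ≤ pvVal (pvIns i L) := by
  set pr : Int → Bool := fun d => decide (5 ≤ d) with hpr
  set p := pvFirst pr L with hp
  have hple : p ≤ L.length := pvFirst_le_length pr L
  rcases Nat.lt_trichotomy i p with hlt | heq | hgt
  · have h5 : L.getD i 0 < 5 := by
      have := pvFirst_before pr L i hlt
      simp only [hpr, decide_eq_false_iff_not, not_le] at this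
      omega
    exact le_of_lt (pvIns_lt_of_lt L hb i p hlt hple h5)
  · rw [heq]
  · have hplen : p < L.length := lt_of_lt_of_le hgt hi
    have h5p : 5 ≤ L.getD p 0 := by
      have := pvFirst_at pr L hplen
      simp only [hpr, decide_eq_true_eq] at this
      exact this
    by_cases h5 : L.getD p 0 = 5
    · by_cases hall : ∀ k, p ≤ k → k < i → L.getD k 0 = 5
      · rw [pvIns_eq_run L p i (le_of_lt hgt) hi hall]
      · push Not at hall
        have hex : ∃ k, p ≤ k ∧ k < i ∧ L.getD k 0 ≠ 5 := by
          obtain ⟨k, h1, h2, h3⟩ := hall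
          exact ⟨k, h1, h2, h3⟩
        obtain ⟨hk1, hk2, hk3⟩ := Nat.find_spec hex
        set k0 := Nat.find hex with hk0
        have hmin : ∀ m, p ≤ m → m < k0 → L.getD m 0 = 5 := by
          intro m hm1 hm2
          by_contra hc
          exact absurd ⟨hm1, by omega, hc⟩ (Nat.find_min hex hm2)
        have hpk0 : p < k0 := by
          rcases Nat.eq_or_lt_of_le hk1 with he | hlt'
          · exact absurd h5 (he ▸ hk3)
          · exact hlt'
        have hk0gt : 5 < L.getD k0 0 := by
          by_contra hc
          push Not at hc
          have h5lt : L.getD k0 0 < 5 := by omega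
          apply hnD
          refine ⟨p, by omega, k0, by omega, hpk0, h5, ?_, ?_, h5lt⟩
          · intro k hk
            have := pvFirst_before pr L k hk
            simp only [hpr, decide_eq_false_iff_not, not_le] at this
            omega
          · intro k hk1' hk2'
            have := hmin k hk2' hk1'
            omega
        have hrun : pvIns p L = pvIns k0 L := pvIns_eq_run L p k0 (le_of_lt hpk0) (by omega) hmin
        rw [hrun]
        exact le_of_lt (pvIns_lt_of_gt L hb k0 i hk2 hi hk0gt)
    · have h5gt : 5 < L.getD p 0 := by omega
      exact le_of_lt (pvIns_lt_of_gt L hb p i hgt hi h5gt)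

-- inside D some candidate strictly beats A's choice
theorem greedy_not_max (L : List Int) (hb : ∀ d ∈ L, 0 ≤ d ∧ d < 10) (hD : pvDpos L) :
    ∃ i ≤ L.length, pvVal (pvIns (pvFirst (fun d => decide (d ≤ 5)) L) L) < pvVal (pvIns i L) := by
  obtain ⟨i, hi, j, hj, hij, h5i, hbef, hmid, h5j⟩ := hD
  have hpfirst : pvFirst (fun d => decide (d ≤ 5)) L = i := by
    apply pvFirst_eq _ _ i hi
    · intro k hk
      have := hbef k hk
      simp only [decide_eq_false_iff_not, not_le]
      omega
    · simp only [decide_eq_true_eq]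
      omega
  have hex : ∃ k, i < k ∧ k ≤ j ∧ L.getD k 0 ≠ 5 := ⟨j, hij, le_refl j, by omega⟩
  obtain ⟨hk1, hk2, hk3⟩ := Nat.find_spec hex
  set k0 := Nat.find hex with hk0
  have hmin : ∀ m, i ≤ m → m < k0 → L.getD m 0 = 5 := by
    intro m hm1 hm2
    rcases Nat.eq_or_lt_of_le hm1 with he | hlt
    · exact he ▸ h5i
    · by_contra hc
      exact absurd ⟨hlt, by omega, hc⟩ (Nat.find_min hex hm2)
  have hk0gt : 5 < L.getD k0 0 := by
    rcases Nat.lt_or_ge k0 j with hlt | hge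
    · have := hmid k0 hlt (by omega)
      omega
    · have hkj : k0 = j := by omega
      rw [hkj]
      exact h5j
  have hrun : pvIns i L = pvIns k0 L := pvIns_eq_run L i k0 (by omega) (by omega) hmin
  refine ⟨k0 + 1, by omega, ?_⟩
  rw [hpfirst, hrun]
  exact pvIns_lt_of_gt L hb k0 (k0 + 1) (by omega) (by omega) hk0gt

theorem greedy_not_min (L : List Int) (hb : ∀ d ∈ L, 0 ≤ d ∧ d < 10) (hD : pvDneg L) :
    ∃ i ≤ L.length, pvVal (pvIns i L) < pvVal (pvIns (pvFirst (fun d => decide (5 ≤ d)) L) L) := by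
  obtain ⟨i, hi, j, hj, hij, h5i, hbef, hmid, h5j⟩ := hD
  have hpfirst : pvFirst (fun d => decide (5 ≤ d)) L = i := by
    apply pvFirst_eq _ _ i hi
    · intro k hk
      have := hbef k hk
      simp only [decide_eq_false_iff_not, not_le]
      omega
    · simp only [decide_eq_true_eq]
      omega
  have hex : ∃ k, i < k ∧ k ≤ j ∧ L.getD k 0 ≠ 5 := ⟨j, hij, le_refl j, by omega⟩
  obtain ⟨hk1, hk2, hk3⟩ := Nat.find_spec hex
  set k0 := Nat.find hex with hk0
  have hmin : ∀ m, i ≤ m → m < k0 → L.getD m 0 = 5 := by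
    intro m hm1 hm2
    rcases Nat.eq_or_lt_of_le hm1 with he | hlt
    · exact he ▸ h5i
    · by_contra hc
      exact absurd ⟨hlt, by omega, hc⟩ (Nat.find_min hex hm2)
  have hk0lt : L.getD k0 0 < 5 := by
    rcases Nat.lt_or_ge k0 j with hlt | hge
    · have := hmid k0 hlt (by omega)
      omega
    · have hkj : k0 = j := by omega
      rw [hkj]
      exact h5j
  have hrun : pvIns i L = pvIns k0 L := pvIns_eq_run L i k0 (by omega) (by omega) hmin
  refine ⟨k0 + 1, by omega, ?_⟩
  rw [hpfirst, hrun]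
  exact pvIns_lt_of_lt L hb k0 (k0 + 1) (by omega) (by omega) hk0lt

-- B's closed form: max/min of the candidate values
theorem alt_max_pos (N : Int) (hN : 0 ≤ N) :
    solution_alt N ∈ (List.range ((bDigits N).length + 1)).map (fun k => pvVal (pvIns k (bDigits N)))
    ∧ ∀ c ∈ (List.range ((bDigits N).length + 1)).map (fun k => pvVal (pvIns k (bDigits N))),
        c ≤ solution_alt N := by
  have hn : (if N < 0 then -N else N) = N := by rw [if_neg (by omega)]
  have hge : (N ≥ 0) = True := by simp; omega
  simp only [solution_alt, hn, candidates_eq, hge, if_true]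
  set cs := (List.range ((bDigits N).length + 1)).map (fun k => pvVal (pvIns k (bDigits N))) with hcs
  have hne : cs ≠ [] := by
    simp [hcs]
  obtain ⟨m', hm'⟩ : ∃ m', PySem.List.max? cs (fun x => x) = some m' := by
    cases h : PySem.List.max? cs (fun x => x) with
    | none => exact absurd ((PySem.List.max?_eq_none_iff cs _).mp h) hne
    | some m' => exact ⟨m', rfl⟩
  rw [hm']
  exact ⟨PySem.List.max?_mem hm', fun c hc => PySem.List.max?_isMax hm' c hc⟩

theorem alt_closed_pos (N : Int) (hN : 0 ≤ N) (m : Int)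
    (hmem : m ∈ (List.range ((bDigits N).length + 1)).map (fun k => pvVal (pvIns k (bDigits N))))
    (hmax : ∀ c ∈ (List.range ((bDigits N).length + 1)).map (fun k => pvVal (pvIns k (bDigits N))), c ≤ m) :
    solution_alt N = m := by
  obtain ⟨h1, h2⟩ := alt_max_pos N hN
  exact le_antisymm (hmax _ h1) (h2 _ hmem)

theorem alt_min_neg (N : Int) (hN : N < 0) :
    -solution_alt N ∈ (List.range ((bDigits (-N)).length + 1)).map (fun k => pvVal (pvIns k (bDigits (-N))))
    ∧ ∀ c ∈ (List.range ((bDigits (-N)).length + 1)).map (fun k => pvVal (pvIns k (bDigits (-N)))),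
        -solution_alt N ≤ c := by
  have hn : (if N < 0 then -N else N) = -N := by rw [if_pos hN]
  have hge : (N ≥ 0) = False := by simp; omega
  simp only [solution_alt, hn, candidates_eq, hge, if_false]
  set cs := (List.range ((bDigits (-N)).length + 1)).map (fun k => pvVal (pvIns k (bDigits (-N)))) with hcs
  have hne : cs ≠ [] := by
    simp [hcs]
  obtain ⟨m', hm'⟩ : ∃ m', PySem.List.min? cs (fun x => x) = some m' := by
    cases h : PySem.List.min? cs (fun x => x) with
    | none => exact absurd ((PySem.List.min?_eq_none_iff cs _).mp h) hne
    | some m' => exact ⟨m', rfl⟩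
  rw [hm']
  simp only [Option.getD_some, neg_neg]
  exact ⟨PySem.List.min?_mem hm', fun c hc => PySem.List.min?_isMin hm' c hc⟩

theorem alt_closed_neg (N : Int) (hN : N < 0) (m : Int)
    (hmem : m ∈ (List.range ((bDigits (-N)).length + 1)).map (fun k => pvVal (pvIns k (bDigits (-N)))))
    (hmin : ∀ c ∈ (List.range ((bDigits (-N)).length + 1)).map (fun k => pvVal (pvIns k (bDigits (-N)))), m ≤ c) :
    solution_alt N = -m := by
  obtain ⟨h1, h2⟩ := alt_min_neg N hN
  have := le_antisymm (hmin _ h1) (h2 _ hmem)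
  omega

-- ===== VERDICT (by name: the statement is the Claim_ definition above) =====
theorem solution_spec : Claim_unchanged_solution := by
  intro N _ hnD
  by_cases hN : 0 ≤ N
  · have hb := bDigits_bounds N
    have hnD' : ¬ pvDpos (bDigits N) := fun h => hnD ((D_iff_pos N hN).mpr h)
    rw [solution_closed_pos N hN]
    symm
    apply alt_closed_pos N hN
    · exact List.mem_map.mpr ⟨pvFirst (fun d => decide (d ≤ 5)) (bDigits N),
        List.mem_range.mpr (by have := pvFirst_le_length (fun d => decide (d ≤ 5)) (bDigits N); omega), rfl⟩
    · intro c hc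
      obtain ⟨k, hk, rfl⟩ := List.mem_map.mp hc
      exact greedy_max _ hb hnD' k (by have := List.mem_range.mp hk; omega)
  · push Not at hN
    have hb := bDigits_bounds (-N)
    have hnD' : ¬ pvDneg (bDigits (-N)) := fun h => hnD ((D_iff_neg N hN).mpr h)
    rw [solution_closed_neg N hN]
    symm
    apply alt_closed_neg N hN
    · exact List.mem_map.mpr ⟨pvFirst (fun d => decide (5 ≤ d)) (bDigits (-N)),
        List.mem_range.mpr (by have := pvFirst_le_length (fun d => decide (5 ≤ d)) (bDigits (-N)); omega), rfl⟩
    · intro c hc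
      obtain ⟨k, hk, rfl⟩ := List.mem_map.mp hc
      exact greedy_min _ hb hnD' k (by have := List.mem_range.mp hk; omega)

theorem solution_changed : Claim_changed_solution := by
  have hb : bDigits 59 = [5, 9] := by
    rw [bDigits_eq_natDigits 59 (by norm_num)]
    have hd : Nat.digits 10 59 = [9, 5] := by decide
    rw [show ((59 : Int)).toNat = 59 from rfl, hd]
    simp
  unfold Claim_changed_solution
  refine ⟨by decide, by decide, ?_, ?_, by decide⟩
  · show solution 59 = 559
    rw [solution_closed_pos 59 (by norm_num), hb]
    decide
  · show solution_alt 59 = 595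
    apply alt_closed_pos 59 (by norm_num)
    · rw [hb]
      refine List.mem_map.mpr ⟨2, List.mem_range.mpr (by norm_num), ?_⟩
      decide
    · rw [hb]
      intro c hc
      obtain ⟨k, hk, rfl⟩ := List.mem_map.mp hc
      have hk3 : k < 3 := by simpa using List.mem_range.mp hk
      interval_cases k <;> decide

theorem solution_tight : Claim_exact_solution := by
  intro N _ hD
  by_cases hN : 0 ≤ N
  · have hb := bDigits_bounds N
    have hD' := (D_iff_pos N hN).mp hD
    obtain ⟨i, hile, hlt⟩ := greedy_not_max _ hb hD'
    have halt := (alt_max_pos N hN).2 _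
      (List.mem_map.mpr ⟨i, List.mem_range.mpr (by omega), rfl⟩)
    rw [solution_closed_pos N hN]
    omega
  · push Not at hN
    have hb := bDigits_bounds (-N)
    have hD' := (D_iff_neg N hN).mp hD
    obtain ⟨i, hile, hlt⟩ := greedy_not_min _ hb hD'
    have halt := (alt_min_neg N hN).2 _
      (List.mem_map.mpr ⟨i, List.mem_range.mpr (by omega), rfl⟩)
    rw [solution_closed_neg N hN]
    omega
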